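-- pv_equiv track=rewrite | github.com/KamilMarszalek/pop | src/astar/success_generator.py | _count_delta_profit
-- ===== SOURCE A (Python) =====
-- def _count_delta_profit(col: list[int], mask: int) -> tuple[int, int]:
--     delta_profit = 0
--     cards_used = 0
--     for row in range(len(col)):
--         if (mask >> row) & 1:
--             delta_profit += col[row]
--             cards_used += 1
--     return delta_profit, cards_used
-- ===== SOURCE B (Python) =====
-- def _count_delta_profit(col: list[int], mask: int) -> tuple[int, int]:
--     # Visit only the SET bits of the masked value instead of scanning every index:
--     # clear the lowest set bit each round and index col at its position.
--     m = mask % (1 << len(col))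
--     delta_profit = 0
--     cards_used = 0
--     while m:
--         nxt = m & (m - 1)  # m with its lowest set bit cleared
--         delta_profit += col[(m ^ nxt).bit_length() - 1]
--         cards_used += 1
--         m = nxt
--     return delta_profit, cards_used
-- ===== Notes on version B (the rewrite author's own statement) =====
-- stated objective: faster
-- what changed: Instead of scanning every index 0..len(col)-1 and testing its mask bit, B reduces the mask modulo 2^len(col) and walks only its set bits, clearing the lowest set bit each iteration (m &= m-1) and recovering the row index via bit_length; the per-index Python loop disappears and the loop runs popcount(masked mask) times.
import Mathlib
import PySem

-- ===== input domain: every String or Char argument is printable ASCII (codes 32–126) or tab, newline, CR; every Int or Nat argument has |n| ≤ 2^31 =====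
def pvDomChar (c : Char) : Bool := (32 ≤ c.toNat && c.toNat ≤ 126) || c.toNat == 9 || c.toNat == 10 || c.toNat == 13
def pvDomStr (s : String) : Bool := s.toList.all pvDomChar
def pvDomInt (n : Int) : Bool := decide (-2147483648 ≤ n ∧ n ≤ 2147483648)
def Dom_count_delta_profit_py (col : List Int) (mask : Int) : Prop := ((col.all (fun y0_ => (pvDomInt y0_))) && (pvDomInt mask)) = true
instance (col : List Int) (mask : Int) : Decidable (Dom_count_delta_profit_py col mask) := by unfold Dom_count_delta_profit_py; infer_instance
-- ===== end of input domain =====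

-- B walks only the SET bits of the masked value (clearing the lowest set bit each round)
-- instead of A's scan over every index with a per-index bit test; same return value.

-- ===== PORT A =====
-- literal port of A: for row in range(len(col)): if (mask >> row) & 1: accumulate.
-- row comes from range(len(col)) so 0 ≤ row: 'mask >> row' is mask >>> row.toNat (exact here).
def count_delta_profit_py (col : List Int) (mask : Int) : Int × Int :=
  (PySem.List.pyRange 0 (PySem.List.len col) 1).foldl
    (fun (s : Int × Int) row =>
      if PySem.Int.band (mask >>> row.toNat) 1 ≠ 0 then
        (s.1 + PySem.List.pyGetD col row 0, s.2 + 1)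
      else s)
    (0, 0)

-- ===== PORT B =====
-- the 'while m:' loop of Source B; m is always ≥ 0 here (it starts as mask % 2^len and only
-- loses bits), so the totalizing guard '0 < m' is 'm != 0' at every reachable state.
def pvAltLoop (col : List Int) (m : Int) (dp cu : Int) : Int × Int :=
  if h : 0 < m then
    let nxt := PySem.Int.band m (m - 1)
    pvAltLoop col nxt
      (dp + PySem.List.pyGetD col ((PySem.Int.bitLength (PySem.Int.bxor m nxt) : Int) - 1) 0)
      (cu + 1)
  else (dp, cu)
termination_by m.toNat
decreasing_by
  rw [PySem.Int.band_of_nonneg (by omega) (by omega)]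
  have h1 : m.toNat &&& (m - 1).toNat ≤ (m - 1).toNat := Nat.and_le_right
  omega

def count_delta_profit_py_alt (col : List Int) (mask : Int) : Int × Int :=
  pvAltLoop col (PySem.Int.mod mask ((1 : Int) <<< col.length)) 0 0

-- ===== PRECONDITION & SPEC =====
def Spec_count_delta_profit_py (col : List Int) (mask : Int) (out : Int × Int) : Prop := out = count_delta_profit_py_alt col mask
instance (col : List Int) (mask : Int) (out : Int × Int) : Decidable (Spec_count_delta_profit_py col mask out) := by unfold Spec_count_delta_profit_py; infer_instance

-- ===== CLAIM (what is proved, stated in full; the proofs are below) =====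
def Claim_equal_count_delta_profit_py : Prop := ∀ (col : List Int) (mask : Int), Dom_count_delta_profit_py col mask → Spec_count_delta_profit_py col mask (count_delta_profit_py col mask)

-- ===== LEMMAS AND PROOFS =====

-- Common reference function: bit-by-bit recursion on the column.
def pvBitSpec (col : List Int) (m : Int) : Int × Int :=
  match col with
  | [] => (0, 0)
  | c :: cs =>
    let p := pvBitSpec cs (PySem.Int.floordiv m 2)
    if PySem.Int.mod m 2 = 1 then (p.1 + c, p.2 + 1) else p

lemma pv_tb_even (x i : Nat) : (2 * x).testBit (i + 1) = x.testBit i := by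
  rw [Nat.testBit_succ]; congr 1; omega

lemma pv_tb_odd (x i : Nat) : (2 * x + 1).testBit (i + 1) = x.testBit i := by
  rw [Nat.testBit_succ]; congr 1; omega

lemma pv_shift_succ (m : Int) (k : Nat) : m >>> (k + 1) = (m >>> (1:Nat)) >>> k := by
  rw [show k + 1 = 1 + k by omega, Int.shiftRight_add]

lemma pv_shift1 (m : Int) : m >>> (1 : Nat) = PySem.Int.floordiv m 2 := by
  rw [Int.shiftRight_eq_div_pow, PySem.Int.floordiv_eq_ediv_of_pos (by norm_num)]; norm_num

lemma pv_mod2_cases (m : Int) : PySem.Int.mod m 2 = 0 ∨ PySem.Int.mod m 2 = 1 := by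
  have h1 := PySem.Int.mod_nonneg m (b := 2) (by norm_num)
  have h2 := PySem.Int.mod_lt m (b := 2) (by norm_num)
  omega

-- A's fold over range(len(col)) computes pvBitSpec.
lemma pv_foldR (col : List Int) : ∀ (mask : Int) (init : Int × Int),
    (List.range col.length).foldl
      (fun (s : Int × Int) (k : Nat) =>
        if PySem.Int.band (mask >>> k) 1 ≠ 0 then (s.1 + col.getD k 0, s.2 + 1) else s) init
    = (init.1 + (pvBitSpec col mask).1, init.2 + (pvBitSpec col mask).2) := by
  induction col with
  | nil => intro mask init; simp [pvBitSpec]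
  | cons c cs ih =>
    intro mask init
    rw [List.length_cons, List.range_succ_eq_map, List.foldl_cons, List.foldl_map]
    have hfun : (fun (s : Int × Int) (k : Nat) =>
        if PySem.Int.band (mask >>> (k + 1)) 1 ≠ 0 then (s.1 + (c :: cs).getD (k + 1) 0, s.2 + 1) else s)
        = (fun (s : Int × Int) (k : Nat) =>
        if PySem.Int.band ((mask >>> (1:Nat)) >>> k) 1 ≠ 0 then (s.1 + cs.getD k 0, s.2 + 1) else s) := by
      funext s k
      rw [pv_shift_succ, List.getD_cons_succ]
    simp only [Nat.succ_eq_add_one, hfun]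
    rw [ih]
    have hs0 : mask >>> (0:Nat) = mask := Int.shiftRight_zero mask
    have hb1 : PySem.Int.band mask 1 = PySem.Int.mod mask 2 := PySem.Int.band_one mask
    simp only [hs0, hb1, pvBitSpec, ← pv_shift1, List.getD_cons_zero]
    rcases pv_mod2_cases mask with h | h
    · rw [h]; norm_num
    · rw [h, if_pos (show (1:Int) ≠ 0 by norm_num), if_pos rfl]
      simp only [Prod.mk.injEq]
      constructor <;> ring

-- the port of A equals pvBitSpec
lemma pv_A_eq (col : List Int) (mask : Int) :
    count_delta_profit_py col mask = pvBitSpec col mask := by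
  unfold count_delta_profit_py
  rw [PySem.List.len_eq, PySem.List.pyRange_zero_nat, List.foldl_map]
  have hfun : (fun (s : Int × Int) (k : Nat) =>
      if PySem.Int.band (mask >>> ((((k : Int)).toNat : Nat) : Int)) 1 ≠ 0 then
        (s.1 + PySem.List.pyGetD col (k : Int) 0, s.2 + 1) else s)
      = (fun (s : Int × Int) (k : Nat) =>
      if PySem.Int.band (mask >>> k) 1 ≠ 0 then (s.1 + col.getD k 0, s.2 + 1) else s) := by
    funext s k
    rw [Int.toNat_natCast, Int.shiftRight_natCast_right, PySem.List.pyGetD_natCast]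
  rw [hfun, pv_foldR]
  simp

-- ediv composition for positive divisors (any numerator)
lemma pv_ediv_ediv (m b c : Int) (hb : 0 < b) (hc : 0 < c) : m / (b * c) = m / b / c := by
  have hbc : 0 < b * c := mul_pos hb hc
  have hm : m = b * c * (m / (b * c)) + m % (b * c) := by
    have := Int.emod_add_mul_ediv m (b * c)
    omega
  have hr0 : 0 ≤ m % (b * c) := Int.emod_nonneg m (ne_of_gt hbc)
  have hrlt : m % (b * c) < b * c := Int.emod_lt_of_pos m hbc
  conv_rhs => rw [hm]
  rw [show b * c * (m / (b * c)) + m % (b * c) = m % (b * c) + b * (c * (m / (b * c))) by ring,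
    Int.add_mul_ediv_left _ _ (ne_of_gt hb),
    Int.add_mul_ediv_left _ _ (ne_of_gt hc)]
  have h1 : m % (b * c) / b < c := by
    rw [Int.ediv_lt_iff_lt_mul hb]; linarith [hrlt]
  have h2 : 0 ≤ m % (b * c) / b := Int.ediv_nonneg hr0 (le_of_lt hb)
  rw [Int.ediv_eq_zero_of_lt h2 h1]
  ring

lemma pv_mod_double_div (m c : Int) (hc : 0 < c) : (m % (2 * c)) / 2 = (m / 2) % c := by
  conv_lhs => rw [Int.emod_def]
  rw [show m - 2 * c * (m / (2 * c)) = m + 2 * (-(c * (m / (2 * c)))) by ring,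
    Int.add_mul_ediv_left _ _ (by norm_num : (2:Int) ≠ 0),
    pv_ediv_ediv m 2 c (by norm_num) hc, Int.emod_def (m / 2) c]
  ring

-- pvBitSpec only reads the low len(col) bits: reducing mod 2^len changes nothing.
lemma pv_mask_eq (col : List Int) : ∀ (m : Int),
    pvBitSpec col (PySem.Int.mod m ((1 : Int) <<< col.length)) = pvBitSpec col m := by
  induction col with
  | nil => intro m; simp [pvBitSpec]
  | cons c cs ih =>
    intro m
    have hp : (0:Int) < (2:Int) ^ cs.length := by positivity
    have hsl : ∀ k : Nat, ((1 : Int) <<< k) = (2:Int) ^ k := by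
      intro k
      rw [Int.shiftLeft_eq]; ring
    have h2c : ((1 : Int) <<< (c :: cs).length) = 2 * ((2:Int) ^ cs.length) := by
      rw [hsl, List.length_cons, pow_succ]; ring
    have hmod : PySem.Int.mod (PySem.Int.mod m ((1 : Int) <<< (c :: cs).length)) 2
        = PySem.Int.mod m 2 := by
      rw [PySem.Int.mod_eq_emod_of_pos (by norm_num),
        PySem.Int.mod_eq_emod_of_pos (by rw [h2c]; positivity),
        PySem.Int.mod_eq_emod_of_pos (by norm_num), h2c]
      exact Int.emod_emod_of_dvd m ⟨(2:Int) ^ cs.length, by ring⟩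
    have hdiv : PySem.Int.floordiv (PySem.Int.mod m ((1 : Int) <<< (c :: cs).length)) 2
        = PySem.Int.mod (PySem.Int.floordiv m 2) ((1 : Int) <<< cs.length) := by
      rw [PySem.Int.floordiv_eq_ediv_of_pos (by norm_num),
        PySem.Int.mod_eq_emod_of_pos (by rw [h2c]; positivity),
        PySem.Int.mod_eq_emod_of_pos (by rw [hsl]; positivity),
        PySem.Int.floordiv_eq_ediv_of_pos (by norm_num), h2c, hsl]
      exact pv_mod_double_div m _ hp
    simp only [pvBitSpec, hmod, hdiv, ih]

-- zero mask: nothing selected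
lemma pv_spec_zero (col : List Int) : pvBitSpec col 0 = (0, 0) := by
  induction col with
  | nil => rfl
  | cons c cs ih =>
    simp [pvBitSpec, ih]

-- bitwise helpers on Nat (testBit extensionality)
lemma pv_and_odd_even (b : Nat) : (2 * b + 1) &&& (2 * b) = 2 * b := by
  apply Nat.eq_of_testBit_eq
  intro i
  cases i with
  | zero => simp [Nat.testBit_zero]
  | succ i =>
    rw [Nat.testBit_and, pv_tb_odd, pv_tb_even, Bool.and_self]

lemma pv_xor_odd_even (b : Nat) : (2 * b + 1) ^^^ (2 * b) = 1 := by
  apply Nat.eq_of_testBit_eq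
  intro i
  cases i with
  | zero => simp [Nat.testBit_zero]
  | succ i =>
    rw [Nat.testBit_xor, pv_tb_odd, pv_tb_even, Bool.xor_self]
    simp [Nat.testBit_succ]

lemma pv_and_even_odd (x y : Nat) : (2 * x) &&& (2 * y + 1) = 2 * (x &&& y) := by
  apply Nat.eq_of_testBit_eq
  intro i
  cases i with
  | zero => simp [Nat.testBit_zero]
  | succ i =>
    rw [Nat.testBit_and, pv_tb_even, pv_tb_odd, pv_tb_even, Nat.testBit_and]

lemma pv_xor_even_even (x y : Nat) : (2 * x) ^^^ (2 * y) = 2 * (x ^^^ y) := by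
  apply Nat.eq_of_testBit_eq
  intro i
  cases i with
  | zero => simp [Nat.testBit_zero]
  | succ i =>
    rw [Nat.testBit_xor, pv_tb_even, pv_tb_even, pv_tb_even, Nat.testBit_xor]

lemma pv_low_pos (M : Nat) (h : 0 < M) : 0 < M ^^^ (M &&& (M - 1)) := by
  rcases Nat.eq_zero_or_pos (M ^^^ (M &&& (M - 1))) with h0 | h0
  · exfalso
    have := Nat.xor_eq_zero_iff.mp h0
    have hle : M &&& (M - 1) ≤ M - 1 := Nat.and_le_right
    omega
  · exact h0

-- clearing the lowest set bit removes exactly one selected row, the one at index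
-- bit_length(m ^ (m & (m-1))) - 1
lemma pv_step (col : List Int) : ∀ (M : Nat), 0 < M → (M : Int) < 2 ^ col.length →
    pvBitSpec col (M : Int)
      = ((pvBitSpec col ((M &&& (M - 1) : Nat) : Int)).1
          + col.getD (PySem.Int.bitLength ((M ^^^ (M &&& (M - 1)) : Nat) : Int) - 1) 0,
        (pvBitSpec col ((M &&& (M - 1) : Nat) : Int)).2 + 1) := by
  induction col with
  | nil =>
    intro M h0 hlt
    exfalso
    simp only [List.length_nil, pow_zero] at hlt
    omega
  | cons c cs ih =>
    intro M h0 hlt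
    have hmodc : ∀ (K : Nat), PySem.Int.mod (K : Int) 2 = ((K % 2 : Nat) : Int) :=
      fun K => PySem.Int.mod_natCast K 2
    have hdivc : ∀ (K : Nat), PySem.Int.floordiv (K : Int) 2 = ((K / 2 : Nat) : Int) :=
      fun K => PySem.Int.floordiv_natCast K 2
    rcases Nat.even_or_odd M with hev | hodd
    · -- M = 2*a with a > 0
      obtain ⟨a, rfl⟩ : ∃ a, M = 2 * a := by
        rcases hev with ⟨a, ha⟩; exact ⟨a, by omega⟩
      have ha0 : 0 < a := by omega
      have hnxt : (2 * a) &&& (2 * a - 1) = 2 * (a &&& (a - 1)) := by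
        rw [show 2 * a - 1 = 2 * (a - 1) + 1 by omega, pv_and_even_odd]
      have hlow : (2 * a) ^^^ (2 * (a &&& (a - 1))) = 2 * (a ^^^ (a &&& (a - 1))) :=
        pv_xor_even_even a (a &&& (a - 1))
      have hlowa : 0 < a ^^^ (a &&& (a - 1)) := pv_low_pos a ha0
      have hbl : PySem.Int.bitLength ((2 * (a ^^^ (a &&& (a - 1))) : Nat) : Int)
          = PySem.Int.bitLength ((a ^^^ (a &&& (a - 1)) : Nat) : Int) + 1 := by
        rw [PySem.Int.bitLength_natCast (by omega : 0 < 2 * (a ^^^ (a &&& (a - 1))))]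
        congr 2
        omega
      have hblpos : 0 < PySem.Int.bitLength ((a ^^^ (a &&& (a - 1)) : Nat) : Int) := by
        rw [PySem.Int.bitLength_natCast hlowa]; omega
      have hacs : (a : Int) < 2 ^ cs.length := by
        have : ((2 * a : Nat) : Int) < 2 ^ (c :: cs).length := hlt
        push_cast at this ⊢
        rw [List.length_cons, pow_succ] at this
        nlinarith
      have ihx := ih a ha0 hacs
      -- unfold both sides
      simp only [pvBitSpec, hmodc, hdivc, hnxt, hlow, hbl]
      rw [show (2 * a) % 2 = 0 by omega, show (2 * a) / 2 = a by omega,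
        show (2 * (a &&& (a - 1))) % 2 = 0 by omega,
        show (2 * (a &&& (a - 1))) / 2 = a &&& (a - 1) by omega]
      simp only [Nat.cast_zero, show ((0:Int) = 1) = False by simp, if_false]
      rw [ihx]
      rw [show PySem.Int.bitLength ((a ^^^ (a &&& (a - 1)) : Nat) : Int) + 1 - 1
          = (PySem.Int.bitLength ((a ^^^ (a &&& (a - 1)) : Nat) : Int) - 1) + 1 by omega,
        List.getD_cons_succ]
    · -- M = 2*b + 1
      obtain ⟨b, rfl⟩ : ∃ b, M = 2 * b + 1 := by
        rcases hodd with ⟨b, hb⟩; exact ⟨b, by omega⟩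
      have hnxt : (2 * b + 1) &&& (2 * b + 1 - 1) = 2 * b := by
        rw [show 2 * b + 1 - 1 = 2 * b by omega, pv_and_odd_even]
      have hlow : (2 * b + 1) ^^^ (2 * b) = 1 := pv_xor_odd_even b
      have hbl1 : PySem.Int.bitLength ((1 : Nat) : Int) = 1 := by decide
      simp only [pvBitSpec, hmodc, hdivc, hnxt, hlow, hbl1]
      rw [show (2 * b + 1) % 2 = 1 by omega, show (2 * b + 1) / 2 = b by omega,
        show (2 * b) % 2 = 0 by omega, show (2 * b) / 2 = b by omega]
      simp

-- the B loop computes pvBitSpec (strong induction on the loop variable)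
lemma pv_loop_eq (col : List Int) (M : Nat) : (M : Int) < 2 ^ col.length →
    ∀ (dp cu : Int), pvAltLoop col (M : Int) dp cu
      = (dp + (pvBitSpec col (M : Int)).1, cu + (pvBitSpec col (M : Int)).2) := by
  induction M using Nat.strong_induction_on with
  | _ M ihM =>
    intro hlt dp cu
    rcases Nat.eq_zero_or_pos M with h0 | h0
    · subst h0
      rw [pvAltLoop]
      simp [pv_spec_zero]
    · rw [pvAltLoop]
      have hpos : (0 : Int) < (M : Int) := by exact_mod_cast h0
      rw [dif_pos hpos]
      have hm1 : ((M : Int) - 1) = ((M - 1 : Nat) : Int) := by omega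
      have hband : PySem.Int.band (M : Int) ((M : Int) - 1) = ((M &&& (M - 1) : Nat) : Int) := by
        rw [hm1, PySem.Int.band_natCast]
      have hxor : PySem.Int.bxor (M : Int) ((M &&& (M - 1) : Nat) : Int)
          = ((M ^^^ (M &&& (M - 1)) : Nat) : Int) := PySem.Int.bxor_natCast _ _
      have hlow : 0 < M ^^^ (M &&& (M - 1)) := pv_low_pos M h0
      have hblpos : 0 < PySem.Int.bitLength ((M ^^^ (M &&& (M - 1)) : Nat) : Int) := by
        rw [PySem.Int.bitLength_natCast hlow]; omega
      have hidx : ((PySem.Int.bitLength ((M ^^^ (M &&& (M - 1)) : Nat) : Int) : Int) - 1)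
          = ((PySem.Int.bitLength ((M ^^^ (M &&& (M - 1)) : Nat) : Int) - 1 : Nat) : Int) := by
        omega
      have hdec : M &&& (M - 1) < M := by
        have : M &&& (M - 1) ≤ M - 1 := Nat.and_le_right
        omega
      have hlt' : ((M &&& (M - 1) : Nat) : Int) < 2 ^ col.length := by
        have : ((M &&& (M - 1) : Nat) : Int) ≤ (M : Int) := by exact_mod_cast le_of_lt hdec
        omega
      simp only [hband, hxor, hidx, PySem.List.pyGetD_natCast]
      rw [ihM _ hdec hlt']
      rw [pv_step col M h0 hlt]
      simp only [Prod.mk.injEq]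
      constructor <;> ring

-- ===== VERDICT (by name: the statement is the Claim_ definition above) =====
theorem count_delta_profit_py_spec : Claim_equal_count_delta_profit_py := by
  intro col mask _
  unfold Spec_count_delta_profit_py count_delta_profit_py_alt
  set m0 : Int := PySem.Int.mod mask ((1 : Int) <<< col.length) with hm0
  have hpow : (0 : Int) < (1 : Int) <<< col.length := by
    rw [Int.shiftLeft_eq]; positivity
  have h0 : 0 ≤ m0 := PySem.Int.mod_nonneg mask hpow
  have hlt : m0 < (1 : Int) <<< col.length := PySem.Int.mod_lt mask hpow
  have hcast : m0 = ((m0.toNat : Nat) : Int) := by omega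
  have hlt2 : ((m0.toNat : Nat) : Int) < 2 ^ col.length := by
    rw [← hcast]
    calc m0 < (1 : Int) <<< col.length := hlt
      _ = 2 ^ col.length := by rw [Int.shiftLeft_eq]; ring
  rw [hcast, pv_loop_eq col m0.toNat hlt2, ← hcast]
  have : pvBitSpec col m0 = pvBitSpec col mask := pv_mask_eq col mask
  rw [this, pv_A_eq]
  simp
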